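-- pv_equiv track=rewrite | github.com/KrzysztofCwikla1/podstawy_programowania | Functions/7_Practice_makes_perfect/19.py | f
-- ===== SOURCE A (Python) =====
-- def f(number):
--     number_str = str(number)
--     total = 0
--     checked = []
--
--     for digit in number_str:
--         if digit not in checked:            #checks if a digit already occured
--             count = number_str.count(digit)
--             if count > 1:                   #if it occured atleast 2 times it adds every instance of the number to the total
--                 total += int(digit) * count
--             checked.append(digit)           # add the digit to the checked list
--
--     return total
-- ===== SOURCE B (Python) =====
-- def f(number):
--     # Arithmetic digit extraction: no string is built at all.  The digits of
--     # abs(number) are tallied into a fixed 10-slot array by repeated divmod by 10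
--     # (the '-' sign occurs at most once in str(number), so it never contributes).
--     n = abs(number)
--     counts = [0] * 10
--     while True:
--         counts[n % 10] += 1
--         n //= 10
--         if n == 0:
--             break
--     return sum(d * c for d, c in enumerate(counts) if c > 1)
-- ===== Notes on version B (the rewrite author's own statement) =====
-- stated objective: alternative
-- what changed: B never builds or scans the string representation: it extracts the digits of abs(number) arithmetically by repeated divmod by 10 into a fixed 10-slot tally array and then sums d*count over enumerate(counts) for counts>1, whereas A scans the characters of str(number) with a 'checked' dedup list and a str.count rescan per new character.
import Mathlib
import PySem

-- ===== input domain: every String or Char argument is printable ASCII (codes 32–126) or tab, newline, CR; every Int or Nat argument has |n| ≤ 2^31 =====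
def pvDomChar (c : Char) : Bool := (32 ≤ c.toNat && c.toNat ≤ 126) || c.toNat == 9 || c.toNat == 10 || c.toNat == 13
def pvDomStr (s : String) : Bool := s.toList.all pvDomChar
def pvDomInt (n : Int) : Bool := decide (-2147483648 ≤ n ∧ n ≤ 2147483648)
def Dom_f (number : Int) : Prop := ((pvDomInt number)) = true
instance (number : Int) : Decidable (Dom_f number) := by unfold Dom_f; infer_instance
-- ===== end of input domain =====

-- B never builds str(number): it extracts the digits of abs(number) arithmetically
-- (repeated divmod by 10) into a 10-slot tally array, then sums d*count over the
-- enumerated tallies with count > 1, while A scans the characters of str(number)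
-- with a dedup list and a str.count rescan per new character.

-- int(digit): exact for the decimal digit characters '0'..'9', the only characters on
-- which A applies it (a character of str(number) with count > 1 is always a digit).
def pvDigitVal (c : Char) : Int := (c.toNat : Int) - 48

-- ===== PORT A =====
def f (number : Int) : Int :=
  let numberStr : List Char := PySem.Int.toChars number
  (numberStr.foldl
    (fun (st : Int × List Char) digit =>
      if digit ∉ st.2 then
        let count : Int := (numberStr.count digit : Int)
        ((if count > 1 then st.1 + pvDigitVal digit * count else st.1), st.2 ++ [digit])
      else st)
    (0, [])).1

-- ===== PORT B =====
-- the do-while loop 'counts[n % 10] += 1; n //= 10; until n == 0' of Source B;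
-- n ≥ 0 throughout and the index n % 10 < 10 = len(counts), so Nat %, /, set and
-- getD compute exactly what the Python list indexing and arithmetic compute.
def pvCountsLoop (n : Nat) (counts : List Int) : List Int :=
  let counts' := counts.set (n % 10) (counts.getD (n % 10) 0 + 1)
  if h : n / 10 = 0 then counts' else pvCountsLoop (n / 10) counts'
termination_by n
decreasing_by exact Nat.div_lt_self (by omega) (by omega)

def f_alt (number : Int) : Int :=
  let n : Nat := number.natAbs                -- abs(number)
  let counts : List Int := pvCountsLoop n (List.replicate 10 0)
  (((PySem.List.enumerate counts 0).filter (fun p => decide (p.2 > 1))).map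
      (fun p => p.1 * p.2)).sum

-- ===== PRECONDITION & SPEC =====
def Spec_f (number : Int) (out : Int) : Prop := out = f_alt number
instance (number : Int) (out : Int) : Decidable (Spec_f number out) := by unfold Spec_f; infer_instance

-- ===== CLAIM (what is proved, stated in full; the proofs are below) =====
def Claim_equal_f : Prop := ∀ (number : Int), Dom_f number → Spec_f number (f number)

-- ===== LEMMAS AND PROOFS =====

-- little-endian decimal digits of n (with 0 ↦ [0]); proof-side mirror of both loops
def pvDigitsLE (n : Nat) : List Nat :=
  if h : n / 10 = 0 then [n % 10] else n % 10 :: pvDigitsLE (n / 10)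
termination_by n
decreasing_by exact Nat.div_lt_self (by omega) (by omega)

def pvCnt (m d : Nat) : Int := ((pvDigitsLE m).count d : Int)

-- contribution of one distinct character of s to A's total
def pvG (s : List Char) (c : Char) : Int :=
  if (s.count c : Int) > 1 then pvDigitVal c * (s.count c : Int) else 0

theorem pvDigitsLE_lt_ten (n : Nat) : ∀ x ∈ pvDigitsLE n, x < 10 := by
  fun_induction pvDigitsLE n with
  | case1 n h => intro x hx; simp at hx; omega
  | case2 n h ih =>
    intro x hx
    rcases List.mem_cons.mp hx with h1 | h2
    · omega
    · exact ih x h2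

theorem pvToDigitsCore_eq (fuel : Nat) : ∀ (n : Nat) (ds : List Char), n < fuel →
    Nat.toDigitsCore 10 fuel n ds = (pvDigitsLE n).reverse.map Nat.digitChar ++ ds := by
  induction fuel with
  | zero => intro n ds h; omega
  | succ fuel ih =>
    intro n ds h
    show (let d := (n % 10).digitChar; let n' := n / 10;
          if n' = 0 then d :: ds else Nat.toDigitsCore 10 fuel n' (d :: ds)) = _
    by_cases h0 : n / 10 = 0
    · simp only [h0, if_true]
      rw [pvDigitsLE, dif_pos h0]
      simp
    · simp only [h0, if_false]
      rw [ih (n / 10) _ (by omega : n / 10 < fuel)]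
      conv_rhs => rw [pvDigitsLE]
      rw [dif_neg h0]
      simp

theorem pvToDigits_eq (n : Nat) :
    Nat.toDigits 10 n = (pvDigitsLE n).reverse.map Nat.digitChar := by
  have := pvToDigitsCore_eq (n + 1) n [] (by omega)
  simpa [Nat.toDigits] using this

theorem pvDigitChar_inj (a b : Nat) (ha : a < 10) (hb : b < 10)
    (h : Nat.digitChar a = Nat.digitChar b) : a = b := by
  have key : ∀ x y : Fin 10, Nat.digitChar x.val = Nat.digitChar y.val → x = y := by decide
  have := key ⟨a, ha⟩ ⟨b, hb⟩ h
  exact congrArg Fin.val this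

theorem pvDigitChar_ne_dash (a : Nat) (ha : a < 10) : Nat.digitChar a ≠ '-' := by
  have key : ∀ x : Fin 10, Nat.digitChar x.val ≠ '-' := by decide
  exact key ⟨a, ha⟩

theorem pvDigitVal_digitChar (d : Nat) (hd : d < 10) : pvDigitVal (Nat.digitChar d) = (d : Int) := by
  have key : ∀ x : Fin 10, pvDigitVal (Nat.digitChar x.val) = (x.val : Int) := by decide
  exact key ⟨d, hd⟩

-- structure of str(number): an optional '-' then the decimal digits of |number|
theorem pvToChars_eq (number : Int) :
    PySem.Int.toChars number =
      (if number < 0 then ['-'] else []) ++ (pvDigitsLE number.natAbs).reverse.map Nat.digitChar := by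
  have htn : number.toNat = number.natAbs ∨ number < 0 := by omega
  simp only [PySem.Int.toChars]
  by_cases hneg : number < 0
  · simp [hneg, pvToDigits_eq]
  · have : number.toNat = number.natAbs := by omega
    simp [hneg, this, pvToDigits_eq]

theorem pvCount_map_digitChar (d : Nat) (hd : d < 10) :
    ∀ l : List Nat, (∀ x ∈ l, x < 10) →
      (l.map Nat.digitChar).count (Nat.digitChar d) = l.count d := by
  intro l
  induction l with
  | nil => intro _; simp
  | cons x l ih =>
    intro h
    have hx : x < 10 := h x (List.mem_cons_self)
    have hrest := ih (fun y hy => h y (List.mem_cons_of_mem _ hy))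
    simp only [List.map_cons, List.count_cons, hrest]
    congr 1
    by_cases hxd : x = d
    · subst hxd; simp
    · have : Nat.digitChar x ≠ Nat.digitChar d := fun hc => hxd (pvDigitChar_inj x d hx hd hc)
      simp [hxd, this]

theorem pvCount_s (number : Int) (d : Nat) (hd : d < 10) :
    ((PySem.Int.toChars number).count (Nat.digitChar d) : Int) = pvCnt number.natAbs d := by
  have h1 : (if number < 0 then ['-'] else []).count (Nat.digitChar d) = 0 := by
    by_cases h : number < 0 <;>
      simp [h, (pvDigitChar_ne_dash d hd).symm]
  have h2 : ((pvDigitsLE number.natAbs).reverse.map Nat.digitChar).count (Nat.digitChar d)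
      = (pvDigitsLE number.natAbs).count d := by
    rw [List.map_reverse, List.count_reverse]
    exact pvCount_map_digitChar d hd _ (pvDigitsLE_lt_ten _)
  have h3 : (PySem.Int.toChars number).count (Nat.digitChar d)
      = (pvDigitsLE number.natAbs).count d := by
    rw [pvToChars_eq, List.count_append, h1, h2, Nat.zero_add]
  rw [h3, pvCnt]

theorem pvCount_dash (number : Int) : (PySem.Int.toChars number).count '-' ≤ 1 := by
  have h2 : ((pvDigitsLE number.natAbs).reverse.map Nat.digitChar).count '-' = 0 := by
    rw [List.count_eq_zero]
    intro hmem
    rcases List.mem_map.mp hmem with ⟨x, hx, hc⟩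
    exact pvDigitChar_ne_dash x (pvDigitsLE_lt_ten _ x (List.mem_reverse.mp hx)) hc
  rw [pvToChars_eq, List.count_append, h2]
  by_cases h : number < 0 <;> simp [h]

-- ---------- A's loop ----------
theorem pvA_loop (s : List Char) (l : List Char) (tot : Int) (chk : List Char) :
    l.foldl
      (fun (st : Int × List Char) digit =>
        if digit ∉ st.2 then
          ((if ((s.count digit : Int)) > 1 then st.1 + pvDigitVal digit * (s.count digit : Int)
            else st.1), st.2 ++ [digit])
        else st)
      (tot, chk)
    = (tot + ((PySem.Set.update chk l).map (pvG s)).sum - (chk.map (pvG s)).sum,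
       PySem.Set.update chk l) := by
  induction l generalizing tot chk with
  | nil => simp [PySem.Set.update_nil]
  | cons c l ih =>
    by_cases hc : c ∈ chk
    · simp only [List.foldl_cons, hc, not_true_eq_false, if_false,
        PySem.Set.update_cons, PySem.Set.add_of_mem hc]
      exact ih tot chk
    · simp only [List.foldl_cons, hc, not_false_eq_true, if_true,
        PySem.Set.update_cons, PySem.Set.add_of_not_mem hc]
      rw [ih]
      have hstep : (if ((s.count c : Int)) > 1 then tot + pvDigitVal c * (s.count c : Int)
          else tot) = tot + pvG s c := by
        unfold pvG; split_ifs <;> omega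
      rw [hstep]
      refine Prod.ext ?_ rfl
      simp only [List.map_append, List.sum_append, List.map_cons, List.map_nil,
        List.sum_cons, List.sum_nil]
      ring

theorem pvA_eq (number : Int) :
    f number = ((PySem.Set.ofList (PySem.Int.toChars number)).map
      (pvG (PySem.Int.toChars number))).sum := by
  unfold f
  dsimp only
  rw [pvA_loop]
  simp [PySem.Set.update_nil_left]

-- A's sum over the distinct characters, re-indexed over the digit values 0..9
-- A's sum over the distinct characters, re-indexed over the digit values 0..9
theorem pvA_sum (number : Int) :
    f number = ∑ d ∈ Finset.range 10,
      (if pvCnt number.natAbs d > 1 then (d : Int) * pvCnt number.natAbs d else 0) := by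
  obtain ⟨s, hs⟩ : ∃ s, s = PySem.Int.toChars number := ⟨_, rfl⟩
  rw [pvA_eq, ← hs]
  have hnodup := PySem.Set.nodup_ofList s
  have hfin : (PySem.Set.ofList s : List Char).toFinset = s.toFinset := by
    ext c; simp [PySem.Set.mem_ofList]
  rw [← List.sum_toFinset _ hnodup, hfin]
  have hF : s.toFinset ⊆ insert '-' ((Finset.range 10).image Nat.digitChar) := by
    intro c hc
    rw [List.mem_toFinset, hs, pvToChars_eq] at hc
    rcases List.mem_append.mp hc with h1 | h2
    · by_cases h : number < 0
      · simp [h] at h1; simp [h1]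
      · simp [h] at h1
    · rcases List.mem_map.mp h2 with ⟨x, hx, hcx⟩
      have : x < 10 := pvDigitsLE_lt_ten _ x (List.mem_reverse.mp hx)
      exact Finset.mem_insert_of_mem (Finset.mem_image.mpr ⟨x, Finset.mem_range.mpr this, hcx⟩)
  rw [Finset.sum_subset hF (by
    intro c _ hcs
    have hzero : s.count c = 0 := List.count_eq_zero.mpr (fun h => hcs (List.mem_toFinset.mpr h))
    simp [pvG, hzero])]
  rw [Finset.sum_insert (by decide)]
  have hdash : pvG s '-' = 0 := by
    have h1 := pvCount_dash number
    rw [← hs] at h1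
    simp only [pvG]
    rw [if_neg (by exact_mod_cast by omega)]
  rw [hdash, zero_add]
  rw [Finset.sum_image (by
    intro x hx y hy hxy
    exact pvDigitChar_inj x y (Finset.mem_range.mp hx) (Finset.mem_range.mp hy) hxy)]
  refine Finset.sum_congr rfl ?_
  intro d hd
  have hd10 := Finset.mem_range.mp hd
  simp only [pvG]
  rw [hs, pvCount_s number d hd10, pvDigitVal_digitChar d hd10]

-- ---------- B's loop ----------
theorem pvCountsLoop_length (n : Nat) : ∀ counts : List Int,
    (pvCountsLoop n counts).length = counts.length := by
  induction n using Nat.strong_induction_on with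
  | _ n ih =>
    intro counts
    rw [pvCountsLoop]
    by_cases h : n / 10 = 0
    · rw [dif_pos h]; simp
    · rw [dif_neg h, ih (n / 10) (by omega)]
      simp

theorem pvCountsLoop_getD (n : Nat) : ∀ (counts : List Int) (d : Nat), d < 10 →
    counts.length = 10 →
      (pvCountsLoop n counts).getD d 0 = counts.getD d 0 + pvCnt n d := by
  induction n using Nat.strong_induction_on with
  | _ n ih =>
    intro counts d hd hlen
    rw [pvCountsLoop]
    have hmod : n % 10 < counts.length := by omega
    by_cases h : n / 10 = 0
    · rw [dif_pos h, pvCnt, pvDigitsLE, dif_pos h]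
      simp only [List.count_cons, List.count_nil]
      rw [List.getD_eq_getElem?_getD, List.getElem?_set]
      by_cases hdm : n % 10 = d
      · subst hdm
        simp [hmod, List.getD_eq_getElem?_getD]
      · have hne : (d == n % 10) = false := by simp; omega
        simp [hdm, hne, List.getD_eq_getElem?_getD]
    · rw [dif_neg h, ih (n / 10) (by omega) _ d hd (by simpa using hlen)]
      conv_rhs => rw [pvCnt, pvDigitsLE, dif_neg h]
      simp only [List.count_cons]
      rw [List.getD_eq_getElem?_getD, List.getElem?_set]
      by_cases hdm : n % 10 = d
      · subst hdm
        simp [hmod, List.getD_eq_getElem?_getD, pvCnt]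
        push_cast
        ring
      · have hne : (d == n % 10) = false := by simp; omega
        simp [hdm, hne, List.getD_eq_getElem?_getD, pvCnt]

theorem pvCounts_eq (m : Nat) :
    pvCountsLoop m (List.replicate 10 0) = (List.range 10).map (fun d => pvCnt m d) := by
  apply List.ext_getElem
  · rw [pvCountsLoop_length]; simp
  · intro i h1 h2
    have hi : i < 10 := by simpa using h2
    have hlen : (pvCountsLoop m (List.replicate 10 0)).length = 10 := by
      rw [pvCountsLoop_length]; simp
    have := pvCountsLoop_getD m (List.replicate 10 0) i hi (by simp)
    rw [List.getD_eq_getElem?_getD, List.getElem?_eq_getElem h1] at this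
    simp only [Option.getD_some] at this
    rw [this]
    have hrep : (List.replicate 10 (0:Int)).getD i 0 = 0 := by
      interval_cases i <;> rfl
    rw [hrep]
    simp

theorem pvEnumerate_append {α : Type} (xs ys : List α) (s : Int) :
    PySem.List.enumerate (xs ++ ys) s
      = PySem.List.enumerate xs s ++ PySem.List.enumerate ys (s + xs.length) := by
  induction xs generalizing s with
  | nil => simp [PySem.List.enumerate]
  | cons x xs ih =>
    rw [List.cons_append, PySem.List.enumerate_cons, PySem.List.enumerate_cons, ih]
    simp only [List.cons_append, List.length_cons]
    congr 2
    push_cast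
    ring

theorem pvSumEnum (g : Nat → Int) (n : Nat) :
    (((PySem.List.enumerate ((List.range n).map g) 0).filter
        (fun p => decide (p.2 > 1))).map (fun p => p.1 * p.2)).sum
      = ∑ d ∈ Finset.range n, (if g d > 1 then (d : Int) * g d else 0) := by
  induction n with
  | zero => simp
  | succ n ih =>
    rw [List.range_succ, List.map_append, pvEnumerate_append,
      List.filter_append, List.map_append, List.sum_append, ih, Finset.sum_range_succ]
    simp only [List.map_cons, List.map_nil, List.length_map, List.length_range,
      PySem.List.enumerate_cons, PySem.List.enumerate_nil]
    by_cases h : g n > 1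
    · simp [h]
    · simp [h]

theorem pvB_eq (number : Int) :
    f_alt number = ∑ d ∈ Finset.range 10,
      (if pvCnt number.natAbs d > 1 then (d : Int) * pvCnt number.natAbs d else 0) := by
  unfold f_alt
  dsimp only
  rw [pvCounts_eq, pvSumEnum]

-- ===== VERDICT (by name: the statement is the Claim_ definition above) =====
theorem f_spec : Claim_equal_f := by
  intro number _
  unfold Spec_f
  rw [pvA_sum, pvB_eq]
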